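-- pv_equiv track=rewrite | github.com/WangWenhao0716/AnyPattern | Generate/code_for_all_patterns.py | _calculate_polygon
-- ===== SOURCE A (Python) =====
-- def _calculate_polygon(polygon, x=0, y=0):
--     polygon = [(i[0] + x, i[1] + y) for i in polygon]
--     box = (min([i[0] for i in polygon]),
--            min([i[1] for i in polygon]),
--            max([i[0] for i in polygon]),
--            max([i[1] for i in polygon]))
--     coords = (box[0], box[1])
--     return polygon, box, coords
-- ===== SOURCE B (Python) =====
-- def _calculate_polygon(polygon, x=0, y=0):
--     shifted = []
--     for px, py in polygon:
--         p = (px + x, py + y)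
--         if shifted:
--             minx = min(minx, p[0])
--             miny = min(miny, p[1])
--             maxx = max(maxx, p[0])
--             maxy = max(maxy, p[1])
--         else:
--             minx, maxx = p[0], p[0]
--             miny, maxy = p[1], p[1]
--         shifted.append(p)
--     box = (minx, miny, maxx, maxy)
--     return shifted, box, (minx, miny)
-- ===== Notes on version B (the rewrite author's own statement) =====
-- stated objective: alternative
-- what changed: Single fused pass that shifts each point and updates four running min/max accumulators, instead of building the shifted list and then scanning it four more times with min/max over four fresh projection lists.
import Mathlib
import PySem

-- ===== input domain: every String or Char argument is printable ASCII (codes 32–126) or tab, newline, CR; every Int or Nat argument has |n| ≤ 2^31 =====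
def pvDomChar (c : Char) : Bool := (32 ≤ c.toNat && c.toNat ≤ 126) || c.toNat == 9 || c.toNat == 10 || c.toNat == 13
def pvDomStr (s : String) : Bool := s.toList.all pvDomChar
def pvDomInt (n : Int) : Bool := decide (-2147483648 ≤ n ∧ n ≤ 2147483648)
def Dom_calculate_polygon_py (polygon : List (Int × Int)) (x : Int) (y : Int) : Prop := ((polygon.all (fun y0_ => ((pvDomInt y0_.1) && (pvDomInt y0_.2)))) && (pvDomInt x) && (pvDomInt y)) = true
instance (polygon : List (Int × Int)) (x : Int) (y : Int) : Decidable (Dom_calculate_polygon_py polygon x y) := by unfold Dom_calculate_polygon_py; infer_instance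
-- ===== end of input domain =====

-- B replaces A's five passes (shift map + four min/max comprehension scans) by one fused
-- pass with running min/max accumulators; objective: alternative (one traversal, no temporaries).


-- ===== PORT A =====
-- literal port of A: shift via map, then four separate min/max scans over fresh
-- projection lists (min/max of an empty list = Python ValueError → none; the
-- `.getD 0` default is never reached inside Pre_, which requires polygon ≠ []).
def calculate_polygon_py (polygon : List (Int × Int)) (x : Int) (y : Int) : (List (Int × Int)) × (Int × Int × Int × Int) × (Int × Int) :=
  let poly := polygon.map (fun i => (i.1 + x, i.2 + y))
  let box : Int × Int × Int × Int :=
    ((PySem.List.min? (poly.map (fun i => i.1)) (fun v => v)).getD 0,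
     (PySem.List.min? (poly.map (fun i => i.2)) (fun v => v)).getD 0,
     (PySem.List.max? (poly.map (fun i => i.1)) (fun v => v)).getD 0,
     (PySem.List.max? (poly.map (fun i => i.2)) (fun v => v)).getD 0)
  let coords : Int × Int := (box.1, box.2.1)
  (poly, box, coords)

-- ===== PORT B =====
-- one loop step of Source B: shift the point, seed or update the four accumulators, append.
def pvStep (x y : Int) (acc : (List (Int × Int)) × Int × Int × Int × Int) (p : Int × Int) :
    (List (Int × Int)) × Int × Int × Int × Int :=
  let q : Int × Int := (p.1 + x, p.2 + y)
  match acc with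
  | (shifted, minx, miny, maxx, maxy) =>
    if shifted.isEmpty then (shifted ++ [q], q.1, q.2, q.1, q.2)
    else (shifted ++ [q], min minx q.1, min miny q.2, max maxx q.1, max maxy q.2)

def calculate_polygon_py_alt (polygon : List (Int × Int)) (x : Int) (y : Int) : (List (Int × Int)) × (Int × Int × Int × Int) × (Int × Int) :=
  let st := polygon.foldl (pvStep x y) ([], 0, 0, 0, 0)
  match st with
  | (shifted, minx, miny, maxx, maxy) =>
    (shifted, (minx, miny, maxx, maxy), (minx, miny))

-- ===== PRECONDITION & SPEC =====
-- Pre_ excludes the empty polygon, on which A raises ValueError (min of an empty list).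
def Pre_calculate_polygon_py (polygon : List (Int × Int)) (x : Int) (y : Int) : Prop := polygon ≠ []
instance (polygon : List (Int × Int)) (x : Int) (y : Int) : Decidable (Pre_calculate_polygon_py polygon x y) := by unfold Pre_calculate_polygon_py; infer_instance
def pvWitness_calculate_polygon_py : (List (Int × Int)) × Int × Int := ([(1, 2), (-3, 4)], 5, -1)

def Spec_calculate_polygon_py (polygon : List (Int × Int)) (x : Int) (y : Int) (out : (List (Int × Int)) × (Int × Int × Int × Int) × (Int × Int)) : Prop := out = calculate_polygon_py_alt polygon x y
instance (polygon : List (Int × Int)) (x : Int) (y : Int) (out : (List (Int × Int)) × (Int × Int × Int × Int) × (Int × Int)) : Decidable (Spec_calculate_polygon_py polygon x y out) := by unfold Spec_calculate_polygon_py; infer_instance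

-- ===== CLAIM (what is proved, stated in full; the proofs are below) =====
def Claim_equal_calculate_polygon_py : Prop := ∀ (polygon : List (Int × Int)) (x : Int) (y : Int), Dom_calculate_polygon_py polygon x y → Pre_calculate_polygon_py polygon x y → Spec_calculate_polygon_py polygon x y (calculate_polygon_py polygon x y)

-- ===== LEMMAS AND PROOFS =====

-- invariant of B's loop once the shifted list is nonempty
theorem pvStep_fold_inv (x y : Int) (rest : List (Int × Int)) :
    ∀ (s : List (Int × Int)) (a b c d : Int), s ≠ [] →
    List.foldl (pvStep x y) (s, a, b, c, d) rest =
      (s ++ rest.map (fun p => (p.1 + x, p.2 + y)),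
       List.foldl (fun m p => min m ((p : Int × Int).1 + x)) a rest,
       List.foldl (fun m p => min m ((p : Int × Int).2 + y)) b rest,
       List.foldl (fun m p => max m ((p : Int × Int).1 + x)) c rest,
       List.foldl (fun m p => max m ((p : Int × Int).2 + y)) d rest) := by
  induction rest with
  | nil => intro s a b c d hs; simp
  | cons p t ih =>
    intro s a b c d hs
    have hne : s.isEmpty = false := by simpa [List.isEmpty_iff] using hs
    simp only [List.foldl_cons, pvStep, hne, Bool.false_eq_true, if_false]
    rw [ih (s ++ [(p.1 + x, p.2 + y)]) _ _ _ _ (by simp)]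
    simp

theorem calculate_polygon_py_eq (polygon : List (Int × Int)) (x : Int) (y : Int)
    (h : polygon ≠ []) :
    calculate_polygon_py polygon x y = calculate_polygon_py_alt polygon x y := by
  obtain ⟨p, rest, rfl⟩ := List.exists_cons_of_ne_nil h
  unfold calculate_polygon_py calculate_polygon_py_alt
  simp only [List.foldl_cons, pvStep, List.isEmpty_nil, if_true, List.nil_append]
  rw [pvStep_fold_inv x y rest [(p.1 + x, p.2 + y)] _ _ _ _ (by simp)]
  simp only [List.map_cons, PySem.List.min?_id_cons, PySem.List.max?_id_cons,
    Option.getD_some, List.foldl_map, List.singleton_append]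

-- ===== VERDICT (by name: the statement is the Claim_ definition above) =====
theorem calculate_polygon_py_spec : Claim_equal_calculate_polygon_py := by
  intro polygon x y _ hpre
  exact calculate_polygon_py_eq polygon x y hpre
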